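-- pv_equiv track=rewrite | github.com/pyeonjaesik/gathering | app/haccp_code_parser.py | _merge_continuation_tokens
-- ===== SOURCE A (Python) =====
-- def _has_unbalanced_brackets(text: str) -> bool:
--     pairs = {"(": ")", "[": "]", "{": "}"}
--     opens = "([{"
--     closes = ")]}"
--     stack: list[str] = []
--     for ch in str(text or ""):
--         if ch in opens:
--             stack.append(ch)
--         elif ch in closes:
--             if not stack:
--                 return True
--             top = stack.pop()
--             if pairs.get(top) != ch:
--                 return True
--     return bool(stack)
--
-- def _merge_continuation_tokens(tokens: list[str]) -> list[str]:
--     if not tokens: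
--         return tokens
--     merged: list[str] = []
--     for tok in tokens:
--         t = str(tok or "").strip()
--         if not t:
--             continue
--         if merged and _has_unbalanced_brackets(merged[-1]):
--             merged[-1] = merged[-1].rstrip() + ", " + t
--             continue
--         merged.append(t)
--     return merged
-- ===== SOURCE B (Python) =====
-- # B: single pass threading the bracket state (broken flag + open-bracket stack) of the
-- # trailing merged element incrementally, so no merged string is ever rescanned.
-- _PAIRS = {"(": ")", "[": "]", "{": "}"}
--
-- def _feed(text, broken, stack, seg):
--     """Advance the bracket state (broken, stack) over the characters of seg; text is carried through."""
--     if broken: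
--         return (text, broken, stack)
--     stack = list(stack)
--     for ch in seg:
--         if ch in "([{":
--             stack.append(ch)
--         elif ch in ")]}":
--             if not stack or _PAIRS[stack.pop()] != ch:
--                 return (text, True, [])
--     return (text, False, stack)
--
-- def _merge_continuation_tokens(tokens):
--     finished = []   # completed elements, in order
--     cur = None      # (text, broken, stack) of the trailing element, or None
--     for tok in tokens:
--         t = (tok or "").strip()
--         if not t:
--             continue
--         if cur is not None and (cur[1] or cur[2]):
--             seg = ", " + t
--             cur = _feed(cur[0] + seg, cur[1], cur[2], seg)
--         else:
--             if cur is not None: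
--                 finished.append(cur[0])
--             cur = _feed(t, False, [], t)
--     if cur is not None:
--         finished.append(cur[0])
--     return finished
-- ===== Notes on version B (the rewrite author's own statement) =====
-- stated objective: alternative
-- what changed: Instead of rescanning the full last merged string with the bracket checker (and re-rstripping it) at every token, B threads the bracket state (broken flag + open-bracket stack) of the trailing element incrementally, feeding it only each newly appended segment, so every character is scanned once.
import Mathlib
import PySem

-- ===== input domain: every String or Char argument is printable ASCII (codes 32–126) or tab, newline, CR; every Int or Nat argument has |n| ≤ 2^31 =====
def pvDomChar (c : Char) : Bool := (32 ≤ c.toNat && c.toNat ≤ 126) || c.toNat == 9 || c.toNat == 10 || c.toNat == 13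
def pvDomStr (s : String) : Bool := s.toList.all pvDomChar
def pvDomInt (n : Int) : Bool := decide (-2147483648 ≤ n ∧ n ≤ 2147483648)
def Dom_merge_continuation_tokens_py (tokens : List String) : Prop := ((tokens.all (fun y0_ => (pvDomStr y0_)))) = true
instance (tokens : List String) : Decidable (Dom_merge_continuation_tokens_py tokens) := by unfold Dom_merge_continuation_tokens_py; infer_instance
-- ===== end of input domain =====

-- B threads the bracket state of the trailing merged element incrementally instead of
-- rescanning the whole last string with the bracket checker at every token (alternative single-scan strategy).


-- ===== PORT A =====
-- pairs.get(top) of A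
def pvPairsGet (c : Char) : Option Char :=
  if c = '(' then some ')' else if c = '[' then some ']' else if c = '{' then some '}' else none

-- the for-loop of _has_unbalanced_brackets; the Python list `stack` (append/pop at the end)
-- is modelled with cons/head at the front
def pvHubLoop (stack : List Char) : List Char → Bool
  | [] => !stack.isEmpty
  | ch :: rest =>
    if ch = '(' || ch = '[' || ch = '{' then pvHubLoop (ch :: stack) rest
    else if ch = ')' || ch = ']' || ch = '}' then
      match stack with
      | [] => true
      | top :: s => if pvPairsGet top ≠ some ch then true else pvHubLoop s rest
    else pvHubLoop stack rest

-- _has_unbalanced_brackets(text); `str(text or "")` is the identity on str arguments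
def pvHasUnbalanced (cs : List Char) : Bool := pvHubLoop [] cs

-- the for-loop of _merge_continuation_tokens; `merged[-1]` = getLast?,
-- `merged[-1] = x` = dropLast ++ [x], `merged.append` = ++ [·]
def pvMergeA (merged : List (List Char)) : List (List Char) → List (List Char)
  | [] => merged
  | tok :: rest =>
    let t := PySem.Chars.strip tok   -- `str(tok or "").strip()`; `tok or ""` is the identity on str
    if t = [] then pvMergeA merged rest
    else
      match merged.getLast? with
      | some last =>
        if pvHasUnbalanced last then
          pvMergeA (merged.dropLast ++ [PySem.Chars.rstrip last ++ [',', ' '] ++ t]) rest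
        else pvMergeA (merged ++ [t]) rest
      | none => pvMergeA (merged ++ [t]) rest

def merge_continuation_tokens_py (tokens : List String) : List String :=
  if tokens = [] then tokens
  else (pvMergeA [] (tokens.map String.toList)).map String.ofList

-- ===== PORT B =====
-- _PAIRS[c]; the default branch is unreachable in B (only open brackets are ever pushed)
def pvCloseOf (c : Char) : Char :=
  if c = '(' then ')' else if c = '[' then ']' else if c = '{' then '}' else ' '

-- the for-loop of _feed (state advance over one segment)
def pvFeedLoop (stack : List Char) : List Char → Bool × List Char
  | [] => (false, stack)
  | ch :: rest =>
    if ch = '(' || ch = '[' || ch = '{' then pvFeedLoop (ch :: stack) rest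
    else if ch = ')' || ch = ']' || ch = '}' then
      match stack with
      | [] => (true, [])
      | top :: s => if pvCloseOf top ≠ ch then (true, []) else pvFeedLoop s rest
    else pvFeedLoop stack rest

-- _feed, dropping the carried text component (the ports carry it in pvMergeB directly)
def pvFeed (broken : Bool) (stack seg : List Char) : Bool × List Char :=
  if broken then (broken, stack) else pvFeedLoop stack seg

-- the for-loop of B's _merge_continuation_tokens: finished elements + trailing (text, broken, stack)
def pvMergeB (finished : List (List Char)) (cur : Option (List Char × Bool × List Char)) :
    List (List Char) → List (List Char)
  | [] => match cur with | none => finished | some c => finished ++ [c.1]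
  | tok :: rest =>
    let t := PySem.Chars.strip tok
    if t = [] then pvMergeB finished cur rest
    else
      match cur with
      | some (text, broken, stack) =>
        if broken || !stack.isEmpty then
          let seg := ',' :: ' ' :: t
          let r := pvFeed broken stack seg
          pvMergeB finished (some (text ++ seg, r.1, r.2)) rest
        else
          let r := pvFeed false [] t
          pvMergeB (finished ++ [text]) (some (t, r.1, r.2)) rest
      | none =>
        let r := pvFeed false [] t
        pvMergeB finished (some (t, r.1, r.2)) rest

def merge_continuation_tokens_py_alt (tokens : List String) : List String :=
  (pvMergeB [] none (tokens.map String.toList)).map String.ofList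

-- ===== PRECONDITION & SPEC =====
def Spec_merge_continuation_tokens_py (tokens : List String) (out : List String) : Prop := out = merge_continuation_tokens_py_alt tokens
instance (tokens : List String) (out : List String) : Decidable (Spec_merge_continuation_tokens_py tokens out) := by unfold Spec_merge_continuation_tokens_py; infer_instance

-- ===== CLAIM (what is proved, stated in full; the proofs are below) =====
def Claim_equal_merge_continuation_tokens_py : Prop := ∀ (tokens : List String), Dom_merge_continuation_tokens_py tokens → Spec_merge_continuation_tokens_py tokens (merge_continuation_tokens_py tokens)

-- ===== LEMMAS AND PROOFS =====

-- an error in pvFeedLoop empties the stack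
theorem pvFeedLoop_broken (cs : List Char) : ∀ stack : List Char,
    (pvFeedLoop stack cs).1 = true → (pvFeedLoop stack cs).2 = [] := by
  induction cs with
  | nil => intro stack h; simp [pvFeedLoop] at h
  | cons ch rest ih =>
    intro stack h
    simp only [pvFeedLoop] at h ⊢
    split_ifs at h ⊢ with h1 h2
    · exact ih _ h
    · match stack with
      | [] => rfl
      | top :: s =>
        simp only at h ⊢
        split_ifs at h ⊢ with h3
        · rfl
        · exact ih _ h
    · exact ih _ h

-- A's unbalanced test in terms of B's state
theorem pvHub_eq_feed (cs : List Char) : ∀ stack : List Char,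
    pvHubLoop stack cs = ((pvFeedLoop stack cs).1 || !(pvFeedLoop stack cs).2.isEmpty) := by
  induction cs with
  | nil => intro stack; simp [pvHubLoop, pvFeedLoop]
  | cons ch rest ih =>
    intro stack
    simp only [pvHubLoop, pvFeedLoop]
    split_ifs with h1 h2
    · exact ih _
    · match stack with
      | [] => simp
      | top :: s =>
        simp only
        have hcond : (pvPairsGet top ≠ some ch) ↔ (pvCloseOf top ≠ ch) := by
          have hch : ch = ')' ∨ ch = ']' ∨ ch = '}' := by
            simp only [Bool.or_eq_true, decide_eq_true_eq] at h2
            tauto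
          by_cases ht1 : top = '('
          · subst ht1; simp [pvPairsGet, pvCloseOf]
          · by_cases ht2 : top = '['
            · subst ht2; simp [pvPairsGet, pvCloseOf, ht1]
            · by_cases ht3 : top = '{'
              · subst ht3; simp [pvPairsGet, pvCloseOf, ht1, ht2]
              · simp only [pvPairsGet, pvCloseOf, if_neg ht1, if_neg ht2, if_neg ht3]
                rcases hch with h | h | h <;> subst h <;> simp
        by_cases hm : pvCloseOf top ≠ ch
        · simp [if_pos (hcond.mpr hm), if_pos hm]
        · simp only [if_neg (fun hh => hm (hcond.mp hh)), if_neg hm]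
          exact ih _
    · exact ih _

-- feeding a concatenation = feeding the pieces in turn
theorem pvFeedLoop_append (u : List Char) : ∀ (stack v : List Char),
    pvFeedLoop stack (u ++ v) =
      if (pvFeedLoop stack u).1 then (true, []) else pvFeedLoop (pvFeedLoop stack u).2 v := by
  induction u with
  | nil => intro stack v; simp [pvFeedLoop]
  | cons ch rest ih =>
    intro stack v
    by_cases h1 : (ch = '(' || ch = '[' || ch = '{') = true
    · simp only [List.cons_append, pvFeedLoop, h1, if_true]
      exact ih _ _
    · by_cases h2 : (ch = ')' || ch = ']' || ch = '}') = true
      · match stack with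
        | [] => simp [List.cons_append, pvFeedLoop, h1, h2]
        | top :: s =>
          by_cases h3 : pvCloseOf top ≠ ch
          · simp [List.cons_append, pvFeedLoop, h1, h2, h3]
          · simp only [List.cons_append, pvFeedLoop, h1, h2, h3, Bool.false_eq_true,
              not_false_eq_true, if_neg, if_pos]
            exact ih _ _
      · simp only [List.cons_append, pvFeedLoop, h1, h2, Bool.false_eq_true, if_false]
        exact ih _ _

-- rstrip is idempotent
theorem pvRstrip_rstrip (cs : List Char) :
    PySem.Chars.rstrip (PySem.Chars.rstrip cs) = PySem.Chars.rstrip cs := by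
  simp only [PySem.Chars.rstrip, List.reverse_reverse]
  rw [List.dropWhile_idempotent]

-- rstrip fixes strip-results
theorem pvRstrip_strip (cs : List Char) :
    PySem.Chars.rstrip (PySem.Chars.strip cs) = PySem.Chars.strip cs := by
  simp [PySem.Chars.strip, pvRstrip_rstrip]

-- appending a nonempty rstrip-fixed tail keeps the whole rstrip-fixed
theorem pvRstrip_append_fixed (x t : List Char) (ht : PySem.Chars.rstrip t = t) (hne : t ≠ []) :
    PySem.Chars.rstrip (x ++ t) = x ++ t := by
  obtain ⟨c, rs, hrev⟩ : ∃ c rs, t.reverse = c :: rs := by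
    rcases List.exists_cons_of_ne_nil (fun h : t.reverse = [] => hne (by simpa using h)) with ⟨c, rs, h⟩
    exact ⟨c, rs, h⟩
  have hdrop : List.dropWhile PySem.Chars.isspace t.reverse = t.reverse := by
    have := congrArg List.reverse ht
    simpa [PySem.Chars.rstrip] using this
  have hc : PySem.Chars.isspace c = false := by
    by_contra hcc
    have hcc' : PySem.Chars.isspace c = true := by
      cases h : PySem.Chars.isspace c
      · exact absurd h hcc
      · rfl
    rw [hrev, List.dropWhile_cons_of_pos hcc'] at hdrop
    have hlen := congrArg List.length hdrop
    have hle := List.length_dropWhile_le (p := PySem.Chars.isspace) (l := rs)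
    simp at hlen
    omega
  have ht' : t = (c :: rs).reverse := by rw [← hrev, List.reverse_reverse]
  simp only [PySem.Chars.rstrip, List.reverse_append]
  rw [hrev, List.cons_append, List.dropWhile_cons_of_neg (by simp [hc]), ht']
  simp

-- the main loop invariant: A's merged list = B's finished ++ [trailing text],
-- with B's (broken, stack) being the scan state of the trailing text
theorem pvMergeAB (toks : List (List Char)) :
    ∀ (finished : List (List Char)) (text : List Char) (broken : Bool) (stack : List Char),
      PySem.Chars.rstrip text = text → text ≠ [] → pvFeedLoop [] text = (broken, stack) →
      pvMergeA (finished ++ [text]) toks = pvMergeB finished (some (text, broken, stack)) toks := by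
  induction toks with
  | nil => intro finished text broken stack _ _ _; simp [pvMergeA, pvMergeB]
  | cons tok rest ih =>
    intro finished text broken stack hr hne hfeed
    simp only [pvMergeA, pvMergeB]
    by_cases ht : PySem.Chars.strip tok = []
    · simp only [ht, if_pos]
      exact ih finished text broken stack hr hne hfeed
    · simp only [if_neg ht, List.getLast?_concat]
      have hhub : pvHasUnbalanced text = (broken || !stack.isEmpty) := by
        simp [pvHasUnbalanced, pvHub_eq_feed, hfeed]
      rw [hhub]
      by_cases hb : (broken || !stack.isEmpty) = true
      · simp only [hb, if_true, List.dropLast_concat, hr]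
        have htfix : PySem.Chars.rstrip (PySem.Chars.strip tok) = PySem.Chars.strip tok :=
          pvRstrip_strip tok
        have htext : text ++ [',', ' '] ++ PySem.Chars.strip tok
            = text ++ (',' :: ' ' :: PySem.Chars.strip tok) := by simp
        rw [htext]
        have hstate : pvFeedLoop [] (text ++ (',' :: ' ' :: PySem.Chars.strip tok))
            = pvFeed broken stack (',' :: ' ' :: PySem.Chars.strip tok) := by
          rw [pvFeedLoop_append, hfeed]
          cases hbr : broken with
          | true =>
            have hst : stack = [] := by
              have hh := pvFeedLoop_broken text []
              rw [hfeed] at hh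
              exact hh hbr
            simp [hst, pvFeed]
          | false => simp [pvFeed]
        have hrfix : PySem.Chars.rstrip (text ++ (',' :: ' ' :: PySem.Chars.strip tok))
            = text ++ (',' :: ' ' :: PySem.Chars.strip tok) := by
          have hh := pvRstrip_append_fixed (text ++ [',', ' ']) (PySem.Chars.strip tok) htfix ht
          simpa [List.append_assoc] using hh
        exact ih finished (text ++ (',' :: ' ' :: PySem.Chars.strip tok))
          (pvFeed broken stack (',' :: ' ' :: PySem.Chars.strip tok)).1
          (pvFeed broken stack (',' :: ' ' :: PySem.Chars.strip tok)).2
          hrfix (by simp) hstate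
      · simp only [Bool.not_eq_true] at hb
        simp only [hb, if_false, Bool.false_eq_true]
        exact ih (finished ++ [text]) (PySem.Chars.strip tok)
          (pvFeed false [] (PySem.Chars.strip tok)).1 (pvFeed false [] (PySem.Chars.strip tok)).2
          (pvRstrip_strip tok) ht (by simp [pvFeed])

-- from the empty start state
theorem pvMergeAB_nil (toks : List (List Char)) :
    pvMergeA [] toks = pvMergeB [] none toks := by
  induction toks with
  | nil => simp [pvMergeA, pvMergeB]
  | cons tok rest ih =>
    simp only [pvMergeA, pvMergeB]
    by_cases ht : PySem.Chars.strip tok = []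
    · simpa [ht] using ih
    · simp only [if_neg ht, List.getLast?_nil]
      have hh := pvMergeAB rest [] (PySem.Chars.strip tok)
        (pvFeed false [] (PySem.Chars.strip tok)).1 (pvFeed false [] (PySem.Chars.strip tok)).2
        (pvRstrip_strip tok) ht (by simp [pvFeed])
      simpa using hh

-- ===== VERDICT (by name: the statement is the Claim_ definition above) =====
theorem merge_continuation_tokens_py_spec : Claim_equal_merge_continuation_tokens_py := by
  intro tokens _
  unfold Spec_merge_continuation_tokens_py merge_continuation_tokens_py merge_continuation_tokens_py_alt
  by_cases h : tokens = []
  · subst h; simp [pvMergeB]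
  · rw [if_neg h, pvMergeAB_nil]
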